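-- pv_equiv track=rewrite | github.com/cadizm/csci570 | dynamic_programming/maxprofit_dp.py | MOPT
-- ===== SOURCE A (Python) =====
-- def MOPT(L, M, i, j):
--     """Memoized version.  As usual, trace back through M to get the i's, j's
--     of the actual solution"""
--     if i < 0:
--         return 0
--     if j < 1:
--         return 0
--     if M[i][j] != None:
--         return M[i][j]
--     else:
--         M[i][j] = max(L[j] - L[i],
--                 MOPT(L, M, i - 1, j - 1),
--                 MOPT(L, M, i - 1, j))
--     return M[i][j]
-- ===== SOURCE B (Python) =====
-- def MOPT(L, M, i, j):
--     """Bottom-up tabulation of the same recurrence (return value only: does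
--     not mutate M; pre-filled memo cells are respected as given values)."""
--     if i < 0 or j < 1:
--         return 0
--     prev = [0] * (j + 1)          # row a-1 of values; row "a = -1" is all zeros
--     for a in range(i + 1):
--         cur = [0]                 # column 0 is the j < 1 base case
--         for b in range(1, j + 1):
--             m = M[a][b]
--             cur.append(m if m is not None else
--                        max(L[b] - L[a], prev[b - 1], prev[b]))
--         prev = cur
--     return prev[j]
-- ===== Notes on version B (the rewrite author's own statement) =====
-- stated objective: alternative
-- what changed: A's mutating top-down memoized recursion is replaced by a bottom-up rolling-row tabulation of the same recurrence (pre-filled memo cells are read as given values; B does not mutate M, the equivalence is about the return value).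
-- outside the precondition, e.g. on MOPT([7], [[None, 3]], 0, 1): A returns 3, B returns 3
import Mathlib
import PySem

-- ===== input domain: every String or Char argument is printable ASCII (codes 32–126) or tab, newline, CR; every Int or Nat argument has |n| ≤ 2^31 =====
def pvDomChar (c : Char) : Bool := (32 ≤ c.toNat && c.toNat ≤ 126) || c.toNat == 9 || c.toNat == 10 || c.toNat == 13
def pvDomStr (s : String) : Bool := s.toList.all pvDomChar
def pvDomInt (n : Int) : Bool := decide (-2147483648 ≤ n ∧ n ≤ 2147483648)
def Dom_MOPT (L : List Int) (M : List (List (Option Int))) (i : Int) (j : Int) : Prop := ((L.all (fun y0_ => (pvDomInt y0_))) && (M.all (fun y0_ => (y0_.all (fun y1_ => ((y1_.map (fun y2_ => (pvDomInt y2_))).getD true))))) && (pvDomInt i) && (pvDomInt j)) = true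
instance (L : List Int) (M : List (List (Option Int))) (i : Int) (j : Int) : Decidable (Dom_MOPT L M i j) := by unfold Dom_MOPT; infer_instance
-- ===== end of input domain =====

-- B replaces A's mutating top-down memoized recursion by a bottom-up rolling-row tabulation
-- of the same recurrence (alternative decomposition). A mutates its memo argument M in place;
-- the equivalence proved here is about the RETURN value only (B does not mutate M).

-- ===== PORT A =====
-- M[i][j] as a double indexed read: none = IndexError (excluded by Pre_)
def pvCell (M : List (List (Option Int))) (i j : Int) : Option (Option Int) :=
  (PySem.List.pyGet? M i).bind (fun r => PySem.List.pyGet? r j)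

-- L[k]; the default 0 is only reached where Python would raise IndexError (outside Pre_)
def pvGetL (L : List Int) (k : Int) : Int :=
  (PySem.List.pyGet? L k).getD 0

-- A, with the in-place mutation of M threaded through as state (value, new M)
def MOPTgo (L : List Int) (M : List (List (Option Int))) (i j : Int) :
    Int × List (List (Option Int)) :=
  if _h : i < 0 then (0, M)
  else if _h2 : j < 1 then (0, M)
  else
    match pvCell M i j with
    | none => (0, M)          -- Python raises IndexError here; outside Pre_
    | some (some v) => (v, M)
    | some none =>
      let p1 := MOPTgo L M (i - 1) (j - 1)
      let p2 := MOPTgo L p1.2 (i - 1) j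
      let v := max (max (pvGetL L j - pvGetL L i) p1.1) p2.1
      -- M[i][j] = v  (here i ≥ 0 and j ≥ 1, so .toNat is the exact index)
      (v, p2.2.set i.toNat ((p2.2.getD i.toNat []).set j.toNat (some v)))
termination_by (i + 1).toNat
decreasing_by all_goals omega

def MOPT (L : List Int) (M : List (List (Option Int))) (i : Int) (j : Int) : Int :=
  (MOPTgo L M i j).1

-- ===== PORT B =====
-- Transliteration of Source B: `for a in range(i+1)` / `for b in range(1, j+1)` become foldl over
-- List.range (with b = t + 1); `cur.append(e)` is `cur ++ [e]`; M[a][b] and L[k] are in range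
-- inside Pre_, so the getD defaults are never reached there.
def pvEntry (L : List Int) (M : List (List (Option Int))) (prev : List Int) (a b : ℕ) : Int :=
  match (M.getD a []).getD b none with
  | some m => m
  | none => max (max (L.getD b 0 - L.getD a 0) (prev.getD (b - 1) 0)) (prev.getD b 0)

-- the inner loop: `cur = [0]; for b in range(1, j+1): cur.append(...)`
def pvRow (L : List Int) (M : List (List (Option Int))) (prev : List Int) (a jn : ℕ) : List Int :=
  (List.range jn).foldl (fun cur t => cur ++ [pvEntry L M prev a (t + 1)]) [0]

def MOPT_alt (L : List Int) (M : List (List (Option Int))) (i : Int) (j : Int) : Int :=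
  if i < 0 ∨ j < 1 then 0
  else
    let jn := j.toNat
    let last := (List.range (i.toNat + 1)).foldl
      (fun prev a => pvRow L M prev a jn) (List.replicate (jn + 1) (0 : Int))
    last.getD jn 0

-- ===== PRECONDITION & SPEC =====
-- Pre_ is the conservative closed-form bound making every index the recursion could touch
-- valid: it demands bounds over the whole rectangle 0..i × 1..j.  A may also RETURN on some
-- inputs outside Pre_, where a pre-filled memo cell shields an out-of-range index from ever
-- being evaluated; those inputs are excluded (see claim.json "cites").
def Pre_MOPT (L : List Int) (M : List (List (Option Int))) (i : Int) (j : Int) : Prop :=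
  0 ≤ i → 1 ≤ j →
    (i < (M.length : Int) ∧ i < (L.length : Int) ∧ j < (L.length : Int) ∧
     ∀ r ∈ M.take (i.toNat + 1), j < (r.length : Int))
instance (L : List Int) (M : List (List (Option Int))) (i : Int) (j : Int) :
    Decidable (Pre_MOPT L M i j) := by unfold Pre_MOPT; infer_instance

def pvWitness_MOPT : List Int × List (List (Option Int)) × Int × Int :=
  ([1, 5, 3], [[none, none], [none, none]], 1, 1)

def Spec_MOPT (L : List Int) (M : List (List (Option Int))) (i : Int) (j : Int) (out : Int) : Prop :=
  out = MOPT_alt L M i j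
instance (L : List Int) (M : List (List (Option Int))) (i : Int) (j : Int) (out : Int) :
    Decidable (Spec_MOPT L M i j out) := by unfold Spec_MOPT; infer_instance

-- ===== CLAIM (what is proved, stated in full; the proofs are below) =====
def Claim_equal_MOPT : Prop := ∀ (L : List Int) (M : List (List (Option Int))) (i : Int) (j : Int), Dom_MOPT L M i j → Pre_MOPT L M i j → Spec_MOPT L M i j (MOPT L M i j)

-- ===== LEMMAS AND PROOFS =====

-- the pure (non-mutating) value of the recurrence over the ORIGINAL memo table
def pvV (L : List Int) (M : List (List (Option Int))) (i j : Int) : Int :=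
  if _h : i < 0 then 0
  else if _h2 : j < 1 then 0
  else
    match pvCell M i j with
    | none => 0
    | some (some v) => v
    | some none =>
        max (max (pvGetL L j - pvGetL L i) (pvV L M (i - 1) (j - 1))) (pvV L M (i - 1) j)
termination_by (i + 1).toNat
decreasing_by all_goals omega

-- invariant: M is M0 with some previously-None cells filled with their pure values
def pvGood (L : List Int) (M0 M : List (List (Option Int))) : Prop :=
  ∀ a b : Int, 0 ≤ a → 1 ≤ b →
    pvCell M a b = pvCell M0 a b ∨
    (pvCell M0 a b = some none ∧ pvCell M a b = some (some (pvV L M0 a b)))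


theorem MOPTgo_main (L : List Int) (M0 : List (List (Option Int))) :
    ∀ (n : ℕ) (i j : Int) (M : List (List (Option Int))),
      (i + 1).toNat ≤ n → pvGood L M0 M →
      (MOPTgo L M i j).1 = pvV L M0 i j ∧
      pvGood L M0 (MOPTgo L M i j).2 ∧
      (∀ a : Int, i < a → PySem.List.pyGet? (MOPTgo L M i j).2 a = PySem.List.pyGet? M a) := by
  intro n
  induction n with
  | zero =>
    intro i j M h hg
    have hi : i < 0 := by omega
    rw [MOPTgo.eq_def, pvV.eq_def]
    simp only [dif_pos hi]
    exact ⟨by trivial, hg, by intro a _; trivial⟩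
  | succ n ih =>
    intro i j M h hg
    by_cases h0 : i < 0
    · rw [MOPTgo.eq_def, pvV.eq_def]
      simp only [dif_pos h0]
      exact ⟨by trivial, hg, by intro a _; trivial⟩
    by_cases h1 : j < 1
    · rw [MOPTgo.eq_def, pvV.eq_def]
      simp only [dif_neg h0, dif_pos h1]
      exact ⟨by trivial, hg, by intro a _; trivial⟩
    have hgood := hg i j (by omega) (by omega)
    cases hc : pvCell M i j with
    | none =>
      have hc0 : pvCell M0 i j = none := by
        rcases hgood with h' | ⟨h', h''⟩
        · rw [← h', hc]
        · rw [hc] at h''; cases h''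
      have hgo : MOPTgo L M i j = (0, M) := by
        conv_lhs => rw [MOPTgo.eq_def]
        simp only [dif_neg h0, dif_neg h1, hc]
      have hv : pvV L M0 i j = 0 := by
        rw [pvV.eq_def]; simp only [dif_neg h0, dif_neg h1, hc0]
      rw [hgo, hv]
      exact ⟨by trivial, hg, by intro a _; trivial⟩
    | some o =>
      cases o with
      | some v =>
        have hgo : MOPTgo L M i j = (v, M) := by
          conv_lhs => rw [MOPTgo.eq_def]
          simp only [dif_neg h0, dif_neg h1, hc]
        have hv : pvV L M0 i j = v := by
          rcases hgood with h' | ⟨h', h''⟩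
          · rw [pvV.eq_def]; simp only [dif_neg h0, dif_neg h1, ← h', hc]
          · rw [hc] at h''
            injection h'' with h''; injection h'' with h''
            exact h''.symm
        rw [hgo, hv]
        exact ⟨by trivial, hg, by intro a _; trivial⟩
      | none =>
        have hc0 : pvCell M0 i j = some none := by
          rcases hgood with h' | ⟨h', _⟩
          · rw [← h', hc]
          · exact h'
        obtain ⟨r, hr, hrj⟩ : ∃ r, PySem.List.pyGet? M i = some r ∧ PySem.List.pyGet? r j = some none := by
          unfold pvCell at hc
          cases hmi : PySem.List.pyGet? M i with
          | none => rw [hmi] at hc; cases hc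
          | some r => rw [hmi] at hc; exact ⟨r, rfl, hc⟩
        have hn' : (i - 1 + 1).toNat ≤ n := by omega
        obtain ⟨ih1v, ih1g, ih1p⟩ := ih (i - 1) (j - 1) M hn' hg
        obtain ⟨ih2v, ih2g, ih2p⟩ := ih (i - 1) j (MOPTgo L M (i - 1) (j - 1)).2 hn' ih1g
        have hv : pvV L M0 i j =
            max (max (pvGetL L j - pvGetL L i) (pvV L M0 (i - 1) (j - 1))) (pvV L M0 (i - 1) j) := by
          rw [pvV.eq_def]; simp only [dif_neg h0, dif_neg h1, hc0]
        have hgo : MOPTgo L M i j =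
            (pvV L M0 i j,
             (MOPTgo L (MOPTgo L M (i - 1) (j - 1)).2 (i - 1) j).2.set i.toNat
               (((MOPTgo L (MOPTgo L M (i - 1) (j - 1)).2 (i - 1) j).2.getD i.toNat []).set j.toNat
                 (some (pvV L M0 i j)))) := by
          conv_lhs => rw [MOPTgo.eq_def]
          simp only [dif_neg h0, dif_neg h1, hc]
          rw [ih1v, ih2v, ← hv]
        -- row i of the state after both child calls is still r
        have hrow : PySem.List.pyGet? (MOPTgo L (MOPTgo L M (i - 1) (j - 1)).2 (i - 1) j).2 i = some r := by
          rw [ih2p i (by omega), ih1p i (by omega), hr]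
        have hi0 : (0:Int) ≤ i := by omega
        have hj0 : (0:Int) ≤ j := by omega
        have hilen : i.toNat < (MOPTgo L (MOPTgo L M (i - 1) (j - 1)).2 (i - 1) j).2.length := by
          have := hrow
          rw [PySem.List.pyGet?_of_nonneg _ hi0] at this
          exact (List.getElem?_eq_some_iff.mp this).1
        have hgetDr : (MOPTgo L (MOPTgo L M (i - 1) (j - 1)).2 (i - 1) j).2.getD i.toNat [] = r := by
          have := hrow
          rw [PySem.List.pyGet?_of_nonneg _ hi0] at this
          rw [List.getD_eq_getElem?_getD, this]; rfl
        have hjlen : j.toNat < r.length := by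
          have := hrj
          rw [PySem.List.pyGet?_of_nonneg _ hj0] at this
          exact (List.getElem?_eq_some_iff.mp this).1
        rw [hgo]
        refine ⟨rfl, ?_, ?_⟩
        · -- pvGood of the written state
          intro a b ha hb
          by_cases hai : a = i
          · subst hai
            have hMa : PySem.List.pyGet?
                ((MOPTgo L (MOPTgo L M (a - 1) (j - 1)).2 (a - 1) j).2.set a.toNat
                  (((MOPTgo L (MOPTgo L M (a - 1) (j - 1)).2 (a - 1) j).2.getD a.toNat []).set j.toNat
                    (some (pvV L M0 a j)))) a
                = some (r.set j.toNat (some (pvV L M0 a j))) := by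
              rw [PySem.List.pyGet?_of_nonneg _ ha, List.getElem?_set_self hilen, hgetDr]
            by_cases hbj : b = j
            · subst hbj
              right
              refine ⟨hc0, ?_⟩
              unfold pvCell
              rw [hMa]
              simp only [Option.bind_some]
              rw [PySem.List.pyGet?_of_nonneg _ hj0, List.getElem?_set_self hjlen]
            · have : pvCell
                  ((MOPTgo L (MOPTgo L M (a - 1) (j - 1)).2 (a - 1) j).2.set a.toNat
                    (((MOPTgo L (MOPTgo L M (a - 1) (j - 1)).2 (a - 1) j).2.getD a.toNat []).set j.toNat
                      (some (pvV L M0 a j)))) a b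
                  = pvCell (MOPTgo L (MOPTgo L M (a - 1) (j - 1)).2 (a - 1) j).2 a b := by
                unfold pvCell
                rw [hMa, hrow]
                simp only [Option.bind_some]
                have hb0 : (0:Int) ≤ b := by omega
                rw [PySem.List.pyGet?_of_nonneg _ hb0, PySem.List.pyGet?_of_nonneg _ hb0]
                exact List.getElem?_set_ne (by omega)
              rw [this]
              exact ih2g a b ha hb
          · have : pvCell
                ((MOPTgo L (MOPTgo L M (i - 1) (j - 1)).2 (i - 1) j).2.set i.toNat
                  (((MOPTgo L (MOPTgo L M (i - 1) (j - 1)).2 (i - 1) j).2.getD i.toNat []).set j.toNat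
                    (some (pvV L M0 i j)))) a b
                = pvCell (MOPTgo L (MOPTgo L M (i - 1) (j - 1)).2 (i - 1) j).2 a b := by
              unfold pvCell
              rw [PySem.List.pyGet?_of_nonneg _ ha, PySem.List.pyGet?_of_nonneg _ ha,
                List.getElem?_set_ne (by omega)]
            rw [this]
            exact ih2g a b ha hb
        · -- rows above i unchanged
          intro a hia
          have ha0 : (0:Int) ≤ a := by omega
          rw [PySem.List.pyGet?_of_nonneg _ ha0, List.getElem?_set_ne (by omega),
            ← PySem.List.pyGet?_of_nonneg _ ha0, ih2p a (by omega), ih1p a (by omega)]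

theorem MOPT_eq_pvV (L : List Int) (M : List (List (Option Int))) (i j : Int) :
    MOPT L M i j = pvV L M i j := by
  unfold MOPT
  exact (MOPTgo_main L M ((i + 1).toNat) i j M le_rfl (fun a b _ _ => Or.inl rfl)).1

theorem pvGetL_natCast (L : List Int) (k : ℕ) : pvGetL L (k : Int) = L.getD k 0 := by
  unfold pvGetL
  rw [PySem.List.pyGet?_natCast, List.getD_eq_getElem?_getD]

theorem pvV_i_neg (L : List Int) (M : List (List (Option Int))) (i j : Int) (hi : i < 0) :
    pvV L M i j = 0 := by
  rw [pvV.eq_def]; simp [hi]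

theorem pvV_j0 (L : List Int) (M : List (List (Option Int))) (i j : Int) (hj : j < 1) :
    pvV L M i j = 0 := by
  rw [pvV.eq_def]
  by_cases h : i < 0
  · simp [h]
  · simp [h, hj]

theorem pvEntry_eq (L : List Int) (M : List (List (Option Int))) (prev : List Int) (a b : ℕ)
    (haM : a < M.length) (hbrow : b < (M.getD a []).length) (hb1 : 1 ≤ b)
    (hprev : ∀ c : ℕ, c ≤ b → prev.getD c 0 = pvV L M ((a : Int) - 1) (c : Int)) :
    pvEntry L M prev a b = pvV L M (a : Int) (b : Int) := by
  have hrowget : M.getD a [] = M[a] := List.getD_eq_getElem M [] haM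
  have hb2 : b < M[a].length := by rwa [hrowget] at hbrow
  have hcell : pvCell M (a : Int) (b : Int) = some ((M.getD a []).getD b none) := by
    unfold pvCell
    rw [PySem.List.pyGet?_natCast M a, List.getElem?_eq_getElem haM]
    simp only [Option.bind_some]
    rw [PySem.List.pyGet?_natCast, List.getElem?_eq_getElem hb2, hrowget,
      List.getD_eq_getElem M[a] none hb2]
  have h0 : ¬ ((a : Int) < 0) := by omega
  have h1 : ¬ ((b : Int) < 1) := by omega
  cases hm : (M.getD a []).getD b none with
  | some m =>
    unfold pvEntry
    rw [hm, pvV.eq_def]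
    simp only [dif_neg h0, dif_neg h1, hcell, hm]
  | none =>
    unfold pvEntry
    rw [hm, pvV.eq_def]
    simp only [dif_neg h0, dif_neg h1, hcell, hm]
    rw [← pvGetL_natCast L b, ← pvGetL_natCast L a,
      hprev (b - 1) (by omega), hprev b le_rfl]
    have hcast : ((b - 1 : ℕ) : Int) = (b : Int) - 1 := by omega
    rw [hcast]

theorem pvFold_eq (L : List Int) (M : List (List (Option Int))) (i j : Int)
    (hi : 0 ≤ i) (hj : 1 ≤ j) (hM : i < (M.length : Int))
    (hrows : ∀ r ∈ M.take (i.toNat + 1), j < (r.length : Int)) :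
    ∀ k : ℕ, k ≤ i.toNat + 1 → ∀ b : ℕ, b ≤ j.toNat →
      ((List.range k).foldl (fun prev a => pvRow L M prev a j.toNat)
          (List.replicate (j.toNat + 1) (0 : Int))).getD b 0 = pvV L M ((k : Int) - 1) (b : Int) := by
  intro k
  induction k with
  | zero =>
    intro _ b hb
    simp only [List.range_zero, List.foldl_nil]
    rw [List.getD_replicate 0 (by omega)]
    rw [pvV_i_neg L M _ _ (by omega)]
  | succ k ihk =>
    intro hk b hb
    rw [List.range_succ, List.foldl_append, List.foldl_cons, List.foldl_nil]
    have hcast : ((k + 1 : ℕ) : Int) - 1 = (k : Int) := by omega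
    rw [hcast]
    have hrowlist : pvRow L M
        ((List.range k).foldl (fun prev a => pvRow L M prev a j.toNat)
          (List.replicate (j.toNat + 1) (0 : Int))) k j.toNat
        = [0] ++ (List.range j.toNat).map
            (fun t => pvEntry L M
              ((List.range k).foldl (fun prev a => pvRow L M prev a j.toNat)
                (List.replicate (j.toNat + 1) (0 : Int))) k (t + 1)) := by
      unfold pvRow
      exact PySem.List.foldl_append_singleton_eq_map _ _ _
    rw [hrowlist]
    have hkM : k < M.length := by omega
    have hrowlen : j.toNat < (M.getD k []).length := by
      have hmem : M[k] ∈ M.take (i.toNat + 1) :=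
        List.mem_iff_getElem.mpr ⟨k, by simp only [List.length_take]; omega, by simp⟩
      have := hrows _ hmem
      rw [List.getD_eq_getElem M [] hkM]
      omega
    cases b with
    | zero =>
      simp only [List.singleton_append, List.getD_cons_zero]
      rw [pvV_j0 L M _ _ (by omega)]
    | succ t =>
      have ht : t < j.toNat := by omega
      have hgd : ([0] ++ (List.range j.toNat).map
            (fun t => pvEntry L M
              ((List.range k).foldl (fun prev a => pvRow L M prev a j.toNat)
                (List.replicate (j.toNat + 1) (0 : Int))) k (t + 1))).getD (t + 1) 0
          = pvEntry L M
              ((List.range k).foldl (fun prev a => pvRow L M prev a j.toNat)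
                (List.replicate (j.toNat + 1) (0 : Int))) k (t + 1) := by
        rw [List.singleton_append, List.getD_cons_succ,
          List.getD_eq_getElem _ 0 (by simpa using ht), List.getElem_map, List.getElem_range]
      rw [hgd]
      exact pvEntry_eq L M _ k (t + 1) hkM (by omega) (by omega)
        (fun c hc => ihk (by omega) c (by omega))

theorem MOPT_alt_eq_pvV (L : List Int) (M : List (List (Option Int))) (i j : Int)
    (hp : Pre_MOPT L M i j) : MOPT_alt L M i j = pvV L M i j := by
  unfold MOPT_alt
  by_cases hb : i < 0 ∨ j < 1
  · rw [if_pos hb]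
    rcases hb with hb | hb
    · exact (pvV_i_neg L M i j hb).symm
    · exact (pvV_j0 L M i j hb).symm
  · rw [if_neg hb]
    have hi : 0 ≤ i := by omega
    have hj : 1 ≤ j := by omega
    obtain ⟨hM, hLi, hLj, hrows⟩ := hp hi hj
    have h := pvFold_eq L M i j hi hj hM hrows (i.toNat + 1) le_rfl j.toNat le_rfl
    have h1 : ((i.toNat + 1 : ℕ) : Int) - 1 = i := by omega
    have h2 : ((j.toNat : ℕ) : Int) = j := by omega
    rw [h1, h2] at h
    exact h

-- ===== VERDICT (by name: the statement is the Claim_ definition above) =====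
theorem MOPT_spec : Claim_equal_MOPT := by
  intro L M i j _hD hP
  unfold Spec_MOPT
  rw [MOPT_eq_pvV, MOPT_alt_eq_pvV L M i j hP]
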